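-- pv_equiv track=rewrite | github.com/IKMalik/DACCER | Encryption.py | decrypted_key
-- ===== SOURCE A (Python) =====
-- def decrypted_key(dict):
--     import sys as sy
--     decryped_key = ''  # holds string of decrypted key
--
--     while len(dict) != 0:  # while not every element checked
--         smallest = sy.maxsize  # set default smallest value to largest value available
--         for pos in dict.keys():  # for position (numerical position of data)
--             if pos < smallest:  # if it is smaller than current smallest
--                 smallest = pos  # smallest now becomes it
--         decryped_key = decryped_key + '{}'.format(dict[smallest]) # write the element with smallest value into key
--         del dict[smallest]  # delete that smallest element from dictionary
--     return decryped_key # when completed , return key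
-- ===== SOURCE B (Python) =====
-- def decrypted_key(dict):
--     # Sort the items once by key and join the values; then empty the dict
--     # like the original does (same observable side effect).
--     out = ''.join('{}'.format(v) for _, v in sorted(dict.items(), key=lambda kv: kv[0]))
--     dict.clear()
--     return out
-- ===== Notes on version B (the rewrite author's own statement) =====
-- stated objective: faster
-- what changed: Replaces the quadratic repeated linear min-scan-and-delete loop with a single sort of the items by key followed by one join of the values (dict is still emptied afterwards).
import Mathlib
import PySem

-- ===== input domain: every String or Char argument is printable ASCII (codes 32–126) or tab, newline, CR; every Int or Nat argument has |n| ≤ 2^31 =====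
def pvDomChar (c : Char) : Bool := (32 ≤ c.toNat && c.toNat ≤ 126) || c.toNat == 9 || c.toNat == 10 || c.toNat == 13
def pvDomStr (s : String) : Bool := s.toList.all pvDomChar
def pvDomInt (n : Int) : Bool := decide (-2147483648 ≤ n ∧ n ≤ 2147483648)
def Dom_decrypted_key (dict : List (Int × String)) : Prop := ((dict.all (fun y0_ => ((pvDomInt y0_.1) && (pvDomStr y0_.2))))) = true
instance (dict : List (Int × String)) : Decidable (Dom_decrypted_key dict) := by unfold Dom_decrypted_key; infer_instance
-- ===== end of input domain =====

-- B replaces A's quadratic min-scan-and-delete loop by one sort of the items by key and a join of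
-- the values; both A and B empty the input dict as a side effect, and the equivalence proved here
-- is about the return value.

-- ===== PORT A =====
-- while len(dict) != 0: scan all keys for the smallest, append dict[smallest], del dict[smallest].
-- Fuel = initial length (each iteration deletes the found key, so the loop ends within that many turns).
def pyALoop : Nat → List (Int × String) → String → String
  | 0, _, acc => acc
  | Nat.succ n, items, acc =>
    if items.length ≠ 0 then
      -- smallest = sys.maxsize; for pos in dict.keys(): if pos < smallest: smallest = pos
      let smallest := (PySem.Dict.keys (⟨items⟩ : PySem.Dict Int String)).foldl
          (fun s p => if p < s then p else s) 9223372036854775807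
      -- decryped_key = decryped_key + '{}'.format(dict[smallest]); del dict[smallest]
      -- ('{}'.format(v) of a str is v itself; Python raises KeyError when smallest is absent,
      --  which can only happen when every key ≥ sys.maxsize, i.e. outside Dom — totality guard only)
      match PySem.Dict.get? (⟨items⟩ : PySem.Dict Int String) smallest with
      | some v => pyALoop n (PySem.Dict.erase (⟨items⟩ : PySem.Dict Int String) smallest).items (acc ++ v)
      | none => acc
    else acc

def decrypted_key (dict : List (Int × String)) : String :=
  pyALoop dict.length dict ""

-- ===== PORT B =====
-- out = ''.join('{}'.format(v) for _, v in sorted(dict.items(), key=lambda kv: kv[0])); dict.clear(); return out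
def decrypted_key_alt (dict : List (Int × String)) : String :=
  PySem.Str.join "" ((PySem.List.sorted dict (fun kv => kv.1)).map (fun kv => kv.2))

-- ===== PRECONDITION & SPEC =====
-- Pre_ models the unique-key invariant of a Python dict: an association list with duplicate keys
-- does not correspond to any Python dict input (dict keys are unique), so such lists are excluded.
def Pre_decrypted_key (dict : List (Int × String)) : Prop := (dict.map Prod.fst).Nodup
instance (dict : List (Int × String)) : Decidable (Pre_decrypted_key dict) := by
  unfold Pre_decrypted_key; infer_instance

def pvWitness_decrypted_key : (List (Int × String)) := [(2, "b"), (1, "a"), (-3, "c")]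

def Spec_decrypted_key (dict : List (Int × String)) (out : String) : Prop := out = decrypted_key_alt dict
instance (dict : List (Int × String)) (out : String) : Decidable (Spec_decrypted_key dict out) := by
  unfold Spec_decrypted_key; infer_instance

-- ===== CLAIM (what is proved, stated in full; the proofs are below) =====
def Claim_equal_decrypted_key : Prop := ∀ (dict : List (Int × String)), Dom_decrypted_key dict → Pre_decrypted_key dict → Spec_decrypted_key dict (decrypted_key dict)

-- ===== LEMMAS AND PROOFS =====

lemma inter_nil_cons (x : List Char) (xs : List (List Char)) :
    ([] : List Char).intercalate (x :: xs) = x ++ ([] : List Char).intercalate xs := by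
  cases xs <;> simp [List.intercalate]

lemma join_empty_cons (s : String) (l : List String) :
    PySem.Str.join "" (s :: l) = s ++ PySem.Str.join "" l := by
  apply String.toList_inj.mp
  simp [PySem.Str.join, PySem.Chars.join, String.toList_append, String.toList_ofList,
    inter_nil_cons]

lemma minscan_eq_foldl_min (keys : List Int) (a : Int) :
    keys.foldl (fun s p => if p < s then p else s) a = keys.foldl min a := by
  apply PySem.List.foldl_congr_mem
  intro acc x _
  simp [min_def]; omega

-- stable sort of a list with pairwise-distinct keys starts with the (unique) minimal-key pair
lemma sorted_min_cons (pre suf : List (Int × String)) (m : Int) (v : String)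
    (hnd : (((pre ++ (m, v) :: suf).map Prod.fst)).Nodup)
    (hm : ∀ k ∈ (pre ++ (m, v) :: suf).map Prod.fst, m ≤ k) :
    PySem.List.sorted (pre ++ (m, v) :: suf) (fun kv => kv.1) =
      (m, v) :: PySem.List.sorted (pre ++ suf) (fun kv => kv.1) := by
  have hnd' : (m :: ((pre ++ suf).map Prod.fst)).Nodup := by
    have := (List.nodup_middle (a := m) (l₁ := pre.map Prod.fst) (l₂ := suf.map Prod.fst)).mp
      (by simpa using hnd)
    simpa using this
  have hmnot : m ∉ (pre ++ suf).map Prod.fst := (List.nodup_cons.mp hnd').1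
  apply PySem.List.sorted_eq_of_perm_of_pairwise_lt
  · exact ((PySem.List.sorted_perm (pre ++ suf) (fun kv => kv.1) false).cons (m, v)).trans
      List.perm_middle.symm
  · refine List.pairwise_cons.mpr ⟨?_, ?_⟩
    · intro q hq
      have hqmem : q ∈ pre ++ suf := (PySem.List.mem_sorted _ _ _ _).mp hq
      have hqmap : q.1 ∈ (pre ++ suf).map Prod.fst := List.mem_map_of_mem hqmem
      have hle : m ≤ q.1 := by
        apply hm
        rcases List.mem_append.mp hqmem with h | h
        · exact List.mem_map.mpr ⟨q, List.mem_append_left _ h, rfl⟩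
        · exact List.mem_map.mpr ⟨q, List.mem_append_right _ (List.mem_cons_of_mem _ h), rfl⟩
      exact lt_of_le_of_ne hle (fun he => hmnot (by rw [show m = q.1 from he]; exact hqmap))
    · have hnds : ((PySem.List.sorted (pre ++ suf) (fun kv => kv.1)).map Prod.fst).Nodup := by
        refine (List.Perm.nodup_iff ?_).mpr (List.nodup_cons.mp hnd').2
        exact (PySem.List.sorted_perm (pre ++ suf) (fun kv => kv.1) false).map Prod.fst
      have hne : List.Pairwise (fun a b : Int × String => a.1 ≠ b.1)
          (PySem.List.sorted (pre ++ suf) (fun kv => kv.1)) := List.pairwise_map.mp hnds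
      exact ((PySem.List.sorted_pairwise (pre ++ suf) (fun kv => kv.1)).and hne).imp
        (fun h => lt_of_le_of_ne h.1 h.2)

lemma loop_eq (n : Nat) : ∀ (items : List (Int × String)) (acc : String),
    items.length ≤ n → Dom_decrypted_key items → (items.map Prod.fst).Nodup →
    pyALoop n items acc = acc ++ decrypted_key_alt items := by
  induction n with
  | zero =>
    intro items acc hlen _ _
    have : items = [] := List.eq_nil_of_length_eq_zero (Nat.le_zero.mp hlen)
    subst this
    simp [pyALoop]
    rw [show decrypted_key_alt [] = "" from rfl, String.append_empty]
  | succ n ih =>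
    intro items acc hlen hdom hnd
    match items with
    | [] =>
      simp [pyALoop]
      rw [show decrypted_key_alt [] = "" from rfl, String.append_empty]
    | hd :: tl =>
      simp only [pyALoop, List.length_cons, Nat.succ_ne_zero, ne_eq, not_false_eq_true, if_true]
      set M : Int := 9223372036854775807 with hM
      set keys := PySem.Dict.keys (⟨hd :: tl⟩ : PySem.Dict Int String) with hkeys
      have hkeys' : keys = (hd :: tl).map Prod.fst := rfl
      rw [minscan_eq_foldl_min]
      set m := keys.foldl min M with hm
      have hle : ∀ y ∈ keys, m ≤ y := (PySem.List.foldl_min_le keys M).2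
      have hdomhd : hd.1 ≤ 2147483648 := by
        have hdom2 := hdom
        simp [Dom_decrypted_key, pvDomInt] at hdom2
        exact hdom2.1.1.2
      have hmem : m ∈ keys := by
        rcases PySem.List.foldl_min_mem keys M with h | h
        · exfalso
          have h1 : hd.1 ∈ keys := by rw [hkeys']; exact List.mem_cons_self ..
          have h2 := hle hd.1 h1
          rw [hm, h] at h2
          rw [hM] at h2; omega
        · exact h
      obtain ⟨q, hqmem, hq1⟩ : ∃ q ∈ hd :: tl, q.1 = m := by
        rw [hkeys'] at hmem
        obtain ⟨q, hq, hq1⟩ := List.mem_map.mp hmem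
        exact ⟨q, hq, hq1⟩
      have hfs : (List.find? (fun p : Int × String => p.1 == m) (hd :: tl)).isSome := by
        rw [List.find?_isSome]
        exact ⟨q, hqmem, by simpa using hq1⟩
      obtain ⟨p, hfind⟩ := Option.isSome_iff_exists.mp hfs
      obtain ⟨hbeq, pre, suf, hsplit, hpre⟩ := List.find?_eq_some_iff_append.mp hfind
      have hp1 : p.1 = m := by simpa using hbeq
      have hpform : p = (m, p.2) := by rw [← hp1]
      have hget : PySem.Dict.get? (⟨hd :: tl⟩ : PySem.Dict Int String) m = some p.2 := by
        simp [PySem.Dict.get?, hfind]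
      have hndsplit : ((pre ++ (m, p.2) :: suf).map Prod.fst).Nodup := by
        rw [← hpform, ← hsplit]; exact hnd
      have hnd' : (m :: ((pre ++ suf).map Prod.fst)).Nodup := by
        have := (List.nodup_middle (a := m) (l₁ := pre.map Prod.fst)
          (l₂ := suf.map Prod.fst)).mp (by simpa using hndsplit)
        simpa using this
      have hmnot : m ∉ (pre ++ suf).map Prod.fst := (List.nodup_cons.mp hnd').1
      have herase : (PySem.Dict.erase (⟨hd :: tl⟩ : PySem.Dict Int String) m).items
          = pre ++ suf := by
        have h1 : pre.filter (fun p : Int × String => !p.1 == m) = pre := by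
          apply List.filter_eq_self.mpr
          intro a ha; simpa using hpre a ha
        have h2 : suf.filter (fun p : Int × String => !p.1 == m) = suf := by
          apply List.filter_eq_self.mpr
          intro a ha
          have : a.1 ≠ m := by
            intro he
            exact hmnot (List.mem_map.mpr ⟨a, List.mem_append_right _ ha, he⟩)
          simpa using this
        have hps : ((!p.1 == m) : Bool) = false := by simp [hp1]
        simp only [PySem.Dict.erase, hsplit, List.filter_append, List.filter_cons, hps]
        simp [h1, h2]
      rw [hget, herase]
      have hstep : (match some p.2 with
          | some v => pyALoop n (pre ++ suf) (acc ++ v)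
          | none => acc) = pyALoop n (pre ++ suf) (acc ++ p.2) := rfl
      rw [hstep]
      have hlen' : (pre ++ suf).length ≤ n := by
        have : (hd :: tl).length = (pre ++ p :: suf).length := by rw [hsplit]
        simp at this hlen ⊢; omega
      have hdom' : Dom_decrypted_key (pre ++ suf) := by
        rw [hsplit] at hdom
        simp [Dom_decrypted_key] at hdom ⊢
        exact ⟨hdom.1, hdom.2.2⟩
      have hnds : ((pre ++ suf).map Prod.fst).Nodup := (List.nodup_cons.mp hnd').2
      rw [ih (pre ++ suf) (acc ++ p.2) hlen' hdom' hnds]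
      have halt : decrypted_key_alt (hd :: tl) = p.2 ++ decrypted_key_alt (pre ++ suf) := by
        unfold decrypted_key_alt
        rw [show hd :: tl = pre ++ (m, p.2) :: suf from by rw [← hpform, ← hsplit]]
        rw [sorted_min_cons pre suf m p.2 hndsplit]
        · rw [List.map_cons, join_empty_cons]
        · intro k hk
          apply hle
          rw [hkeys', show hd :: tl = pre ++ (m, p.2) :: suf from by rw [← hpform, ← hsplit]]
          exact hk
      rw [halt, String.append_assoc]

-- ===== VERDICT (by name: the statement is the Claim_ definition above) =====
theorem decrypted_key_spec : Claim_equal_decrypted_key := by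
  intro dict hdom hpre
  unfold Spec_decrypted_key decrypted_key
  simpa using loop_eq dict.length dict "" le_rfl hdom hpre
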